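-- pv_equiv track=rewrite | github.com/Qweaper/openFoam_project | tools/change_vars.py | change_vars
-- ===== SOURCE A (Python) =====
-- from typing import Dict, List
--
-- def change_vars(file_data : List, new_vars : Dict) -> List:
--     var = list(new_vars.keys())
--     value = list(new_vars.values())
--     indexies = [ind for ind in range(len(file_data))
--                 if '***' in file_data[ind]]
--     for line, ind in zip(indexies, range(len(var))):
--         file_data[line] = f'{var[ind]} {value[ind]};\n'
--     return file_data
-- ===== SOURCE B (Python) =====
-- def change_vars(file_data, new_vars):
--     pos = 0
--     for var, value in new_vars.items():
--         while pos < len(file_data) and '***' not in file_data[pos]: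
--             pos += 1
--         if pos == len(file_data):
--             break
--         file_data[pos] = f'{var} {value};\n'
--         pos += 1
--     return file_data
-- ===== Notes on version B (the rewrite author's own statement) =====
-- stated objective: alternative
-- what changed: Inverts the loop structure: instead of scanning every line to collect all marker indices and zipping them with the variables, B iterates over the (key, value) pairs and for each one seeks forward to the next '***' line, stopping early (without touching the rest of the file) once the pairs or the markers are exhausted.
import Mathlib
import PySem

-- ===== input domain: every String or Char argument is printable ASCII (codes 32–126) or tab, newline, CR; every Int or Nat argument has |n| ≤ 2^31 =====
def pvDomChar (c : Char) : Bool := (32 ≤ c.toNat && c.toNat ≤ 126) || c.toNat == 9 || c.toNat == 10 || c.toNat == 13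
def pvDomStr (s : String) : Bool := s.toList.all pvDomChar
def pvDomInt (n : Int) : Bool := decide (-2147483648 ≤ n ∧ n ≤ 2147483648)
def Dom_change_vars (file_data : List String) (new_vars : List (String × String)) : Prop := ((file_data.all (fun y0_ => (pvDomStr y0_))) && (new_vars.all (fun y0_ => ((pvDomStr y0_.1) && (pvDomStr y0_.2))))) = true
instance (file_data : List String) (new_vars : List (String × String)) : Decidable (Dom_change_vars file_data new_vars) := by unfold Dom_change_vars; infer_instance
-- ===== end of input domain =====

-- B inverts the loop structure: it iterates over the (key, value) pairs, seeking forward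
-- to the next '***' line for each, instead of A's scan-all-lines-collect-indices-then-zip;
-- same return value (both Pythons mutate file_data in place on the same positions).

-- f'{k} {v};\n'  (exact on the ASCII domain; built on List Char so the kernel reduces it)
def pvFmt (k v : String) : String := String.ofList (k.toList ++ ' ' :: (v.toList ++ [';', '\n']))

-- ===== PORT A =====
def change_vars (file_data : List String) (new_vars : List (String × String)) : List String :=
  let var := new_vars.map Prod.fst
  let value := new_vars.map Prod.snd
  let indexies := (List.range file_data.length).filter
    (fun ind => PySem.Str.isIn "***" (file_data.getD ind ""))
  (indexies.zip (List.range var.length)).foldl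
    (fun fd p => fd.set p.1 (pvFmt (var.getD p.2 "") (value.getD p.2 ""))) file_data

-- ===== PORT B =====
-- the inner 'while pos < len(file_data) and "***" not in file_data[pos]: pos += 1'
def pvSeek (fd : List String) (pos : Nat) : Nat :=
  if _h : pos < fd.length then
    if PySem.Str.isIn "***" (fd.getD pos "") then pos else pvSeek fd (pos + 1)
  else pos
termination_by fd.length - pos

-- the outer 'for var, value in new_vars.items():' loop carrying pos
def pvPlace (fd : List String) (pos : Nat) : List (String × String) → List String
  | [] => fd
  | (k, v) :: rest =>
      let p := pvSeek fd pos
      if p = fd.length then fd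
      else pvPlace (fd.set p (pvFmt k v)) (p + 1) rest

def change_vars_alt (file_data : List String) (new_vars : List (String × String)) : List String :=
  pvPlace file_data 0 new_vars

-- ===== PRECONDITION & SPEC =====
def Spec_change_vars (file_data : List String) (new_vars : List (String × String)) (out : List String) : Prop := out = change_vars_alt file_data new_vars
instance (file_data : List String) (new_vars : List (String × String)) (out : List String) : Decidable (Spec_change_vars file_data new_vars out) := by unfold Spec_change_vars; infer_instance

-- ===== CLAIM (what is proved, stated in full; the proofs are below) =====
def Claim_equal_change_vars : Prop := ∀ (file_data : List String) (new_vars : List (String × String)), Dom_change_vars file_data new_vars → Spec_change_vars file_data new_vars (change_vars file_data new_vars)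

-- ===== LEMMAS AND PROOFS =====

-- proof-side intermediate: a head-to-tail recursion both ports reduce to
def pvLin : List String → List (String × String) → List String
  | [], _ => []
  | l :: ls, [] => l :: pvLin ls []
  | l :: ls, (k, v) :: rest =>
      if PySem.Str.isIn "***" l then pvFmt k v :: pvLin ls rest
      else l :: pvLin ls ((k, v) :: rest)

-- sets through an untouched head line: indices shifted by one leave the head alone
theorem foldl_set_shift (ps : List (Nat × Nat)) (a : String) (t : List String)
    (F : Nat × Nat → String) :
    List.foldl (fun fd p => fd.set (p.1 + 1) (F p)) (a :: t) ps
      = a :: List.foldl (fun fd p => fd.set p.1 (F p)) t ps := by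
  induction ps generalizing t with
  | nil => rfl
  | cons p ps ih => simpa [List.set] using ih (t.set p.1 (F p))

theorem lin_nil_vars (ls : List String) : pvLin ls [] = ls := by
  induction ls with
  | nil => rfl
  | cons l ls ih => simpa [pvLin] using ih

theorem lin_keep (l : String) (ls : List String) (kvs : List (String × String))
    (hl : ¬ PySem.Str.isIn "***" l = true) :
    pvLin (l :: ls) kvs = l :: pvLin ls kvs := by
  cases kvs with
  | nil => rfl
  | cons kv rest =>
    obtain ⟨k, v⟩ := kv
    simp only [pvLin]
    rw [if_neg hl]

theorem change_vars_eq_lin (file_data : List String) (new_vars : List (String × String)) :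
    change_vars file_data new_vars = pvLin file_data new_vars := by
  induction file_data generalizing new_vars with
  | nil => cases new_vars <;> rfl
  | cons l ls ih =>
    by_cases hl : PySem.Str.isIn "***" l = true
    · cases new_vars with
      | nil =>
        simp only [change_vars, List.map_nil, List.length_nil, List.range_zero,
          List.zip_nil_right, List.foldl_nil, lin_nil_vars]
      | cons kv rest =>
        obtain ⟨k, v⟩ := kv
        have hrec := ih rest
        simp only [change_vars] at hrec ⊢
        simp only [List.length_cons, List.map_cons, List.length_map]
        rw [List.range_succ_eq_map, List.range_succ_eq_map]
        simp only [List.filter_cons, List.getD_cons_zero, hl, if_true,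
          List.filter_map, List.zip_cons_cons, List.zip_map, List.foldl_cons,
          List.foldl_map, Function.comp_def, List.getD_cons_succ, Prod.map,
          List.set, Nat.succ_eq_add_one]
        rw [foldl_set_shift]
        simp only [pvLin, hl, if_true, List.cons.injEq]
        refine ⟨trivial, ?_⟩
        rw [← hrec]
        simp only [List.length_map]
    · have hrec := ih new_vars
      rw [lin_keep l ls new_vars hl, ← hrec]
      simp only [change_vars, List.length_cons]
      rw [List.range_succ_eq_map]
      simp only [List.filter_cons, List.getD_cons_zero, hl, if_false,
        List.filter_map, List.zip_map_left, List.foldl_map, Function.comp_def,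
        List.getD_cons_succ, Prod.map, Nat.succ_eq_add_one, id, Bool.false_eq_true, if_false]
      rw [foldl_set_shift]

-- take (pos+1) of a list set at pos
theorem pvTakeSetSucc {α : Type} (fd : List α) {pos : Nat} (h : pos < fd.length) (x : α) :
    (fd.set pos x).take (pos + 1) = fd.take pos ++ [x] := by
  rw [List.take_add_one]
  simp [List.getElem?_set_self (by omega), List.take_set_of_le (le_refl pos)]

theorem pvTakeSucc {α : Type} {fd : List α} {pos : Nat} (h : pos < fd.length) :
    fd.take (pos + 1) = fd.take pos ++ [fd[pos]'h] := by
  rw [List.take_add_one]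
  simp [List.getElem?_eq_getElem h]

-- the invariant of B's outer loop, in terms of pvLin on the unscanned suffix
theorem pvPlace_eq_lin (kvs : List (String × String)) (fd : List String) (pos : Nat)
    (hp : pos ≤ fd.length) :
    pvPlace fd pos kvs = fd.take pos ++ pvLin (fd.drop pos) kvs := by
  induction kvs generalizing fd pos with
  | nil => simp [pvPlace, lin_nil_vars]
  | cons kv rest ih =>
    obtain ⟨k, v⟩ := kv
    -- inner induction on how far pvSeek travels
    have main : ∀ n fd pos, fd.length - pos ≤ n → pos ≤ fd.length →
        pvPlace fd pos ((k, v) :: rest) = fd.take pos ++ pvLin (fd.drop pos) ((k, v) :: rest) := by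
      intro n
      induction n with
      | zero =>
        intro fd pos hn hp
        have hpos : pos = fd.length := by omega
        subst hpos
        have hseek : pvSeek fd fd.length = fd.length := by rw [pvSeek]; simp
        simp [pvPlace, hseek, List.drop_length, pvLin]
      | succ n ihn =>
        intro fd pos hn hp
        rcases Nat.eq_or_lt_of_le hp with heq | hlt
        · subst heq
          have hseek : pvSeek fd fd.length = fd.length := by rw [pvSeek]; simp
          simp [pvPlace, hseek, List.drop_length, pvLin]
        · have hget : fd.getD pos "" = fd[pos]'hlt := by
            simp [List.getD, List.getElem?_eq_getElem hlt]
          have hdrop : fd.drop pos = fd[pos]'hlt :: fd.drop (pos + 1) :=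
            List.drop_eq_getElem_cons hlt
          by_cases hm : PySem.Str.isIn "***" (fd[pos]'hlt) = true
          · -- marker found at pos: seek stops here, place it, recurse on rest via outer ih
            have hseek : pvSeek fd pos = pos := by
              rw [pvSeek, dif_pos hlt, hget, if_pos hm]
            have hne : ¬ pos = fd.length := by omega
            have hstep := ih (fd.set pos (pvFmt k v)) (pos + 1) (by simp; omega)
            simp only [pvPlace, hseek, hne, if_false]
            rw [hstep]
            rw [hdrop]
            simp only [pvLin, hm, if_true]
            rw [pvTakeSetSucc _ hlt, List.drop_set_of_lt (by omega)]
            simp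
          · -- no marker at pos: both sides skip this line
            have hseekstep : pvSeek fd pos = pvSeek fd (pos + 1) := by
              rw [pvSeek, dif_pos hlt, hget, if_neg hm]
            have hplace : pvPlace fd pos ((k, v) :: rest) = pvPlace fd (pos + 1) ((k, v) :: rest) := by
              simp only [pvPlace, hseekstep]
            have hrw := ihn fd (pos + 1) (by omega) (by omega)
            rw [hplace, hrw, hdrop, lin_keep _ _ _ hm, pvTakeSucc hlt]
            simp only [List.append_assoc, List.singleton_append]
    exact main (fd.length - pos) fd pos le_rfl hp

-- ===== VERDICT (by name: the statement is the Claim_ definition above) =====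
theorem change_vars_spec : Claim_equal_change_vars := by
  intro fd nv _
  show change_vars fd nv = change_vars_alt fd nv
  rw [change_vars_eq_lin, change_vars_alt, pvPlace_eq_lin nv fd 0 (Nat.zero_le _)]
  simp
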